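-- pv_equiv track=rewrite | github.com/RAJUS248/Data-Structure-and-Algorithms | 01_Array or List/30_Find Transition Point.py | Find_Transition_Point_v2
-- ===== SOURCE A (Python) =====
-- def Find_Transition_Point_v2(arr):
--
--     low = 0
--     high = len(arr)-1
--
--     t_point = -1
--
--     while low <= high:
--
--         mid = (low + high)//2
--
--         if arr[mid] == 1:
--
--             t_point = mid
--
--             high = mid - 1
--
--         else:
--
--             low = mid + 1
--
--     return t_point
-- ===== SOURCE B (Python) =====
-- def Find_Transition_Point_v2(arr):
--     # Accumulator-free recursive descent on (offset, segment length); the answer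
--     # is recovered from the final boundary position instead of being tracked.
--     def boundary(low, n):
--         if n == 0:
--             return low
--         k = (n - 1) // 2
--         if arr[low + k] == 1:
--             return boundary(low, k)
--         return boundary(low + k + 1, n - k - 1)
--     p = boundary(0, len(arr))
--     return p if p < len(arr) else -1
-- ===== Notes on version B (the rewrite author's own statement) =====
-- stated objective: alternative
-- what changed: Replaces A's iterative (low, high, t_point) loop with an accumulator-free recursive descent on (offset, segment length) that returns the final boundary position, from which the transition index (or -1) is recovered by a single comparison with len(arr).
import Mathlib
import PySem

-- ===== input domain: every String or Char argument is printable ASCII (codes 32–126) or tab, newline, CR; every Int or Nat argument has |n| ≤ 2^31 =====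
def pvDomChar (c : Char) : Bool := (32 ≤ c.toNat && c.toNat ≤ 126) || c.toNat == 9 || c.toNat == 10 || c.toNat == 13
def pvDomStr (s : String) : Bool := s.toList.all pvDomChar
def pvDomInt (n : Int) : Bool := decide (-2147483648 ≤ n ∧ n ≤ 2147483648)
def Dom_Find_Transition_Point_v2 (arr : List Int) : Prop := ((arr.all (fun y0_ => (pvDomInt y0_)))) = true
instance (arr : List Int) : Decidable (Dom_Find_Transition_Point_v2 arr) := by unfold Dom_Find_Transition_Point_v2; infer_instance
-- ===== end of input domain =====

-- B replaces A's iterative loop with its mutable t_point accumulator by an accumulator-free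
-- recursive descent on (offset, segment length), recovering the answer from the final boundary
-- position (alternative decomposition; same values on all inputs).

-- ===== PORT A =====
-- the while loop of A; t is the running t_point. arr[mid] is pyGet?; the none
-- (IndexError) branch is unreachable from the top-level call (mid always lies in [low,high] ⊆ [0,len-1]).
def ftpLoopA (arr : List Int) (low high t : Int) : Int :=
  if hle : low ≤ high then
    let mid := PySem.Int.floordiv (low + high) 2
    match PySem.List.pyGet? arr mid with
    | some v =>
        if v == 1 then ftpLoopA arr low (mid - 1) mid
        else ftpLoopA arr (mid + 1) high t
    | none => t
  else t
termination_by (high + 1 - low).toNat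
decreasing_by
  · have := PySem.Int.floordiv_two_mid_bounds hle; omega
  · have := PySem.Int.floordiv_two_mid_bounds hle; omega

def Find_Transition_Point_v2 (arr : List Int) : Int :=
  ftpLoopA arr 0 ((arr.length : Int) - 1) (-1)

-- ===== PORT B =====
-- boundary(low, n) of Source B: indices are nonnegative throughout, kept as Nat; the none
-- (IndexError) branch is unreachable from the top-level call (low + k < low + n ≤ len).
def ftpBoundaryB (arr : List Int) (low n : Nat) : Int :=
  if n = 0 then (low : Int)
  else
    let k := (n - 1) / 2
    match PySem.List.pyGet? arr ((low + k : Nat) : Int) with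
    | some v =>
        if v == 1 then ftpBoundaryB arr low k
        else ftpBoundaryB arr (low + k + 1) (n - k - 1)
    | none => (low : Int)
termination_by n
decreasing_by
  · omega
  · omega

def Find_Transition_Point_v2_alt (arr : List Int) : Int :=
  let p := ftpBoundaryB arr 0 arr.length
  if p < (arr.length : Int) then p else -1

-- ===== PRECONDITION & SPEC =====
def Spec_Find_Transition_Point_v2 (arr : List Int) (out : Int) : Prop := out = Find_Transition_Point_v2_alt arr
instance (arr : List Int) (out : Int) : Decidable (Spec_Find_Transition_Point_v2 arr out) := by unfold Spec_Find_Transition_Point_v2; infer_instance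

-- ===== CLAIM (what is proved, stated in full; the proofs are below) =====
def Claim_equal_Find_Transition_Point_v2 : Prop := ∀ (arr : List Int), Dom_Find_Transition_Point_v2 arr → Spec_Find_Transition_Point_v2 arr (Find_Transition_Point_v2 arr)

-- ===== LEMMAS AND PROOFS =====

-- B's boundary stays inside [low, low+n].
theorem ftpBoundaryB_bounds (arr : List Int) :
    ∀ (n low : Nat), (low : Int) ≤ ftpBoundaryB arr low n ∧ ftpBoundaryB arr low n ≤ ((low + n : Nat) : Int) := by
  intro n
  induction n using Nat.strong_induction_on with
  | _ n ih =>
    intro low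
    rw [ftpBoundaryB]
    by_cases h : n = 0
    · simp [h]
    · simp only [if_neg h]
      cases hg : PySem.List.pyGet? arr ((low + (n - 1) / 2 : Nat) : Int) with
      | none => refine ⟨le_refl _, ?_⟩; push_cast; omega
      | some v =>
        by_cases hv : v == 1
        · simp only [hv, if_true]
          have := ih ((n - 1) / 2) (by omega) low
          refine ⟨this.1, ?_⟩
          have := this.2; push_cast at this ⊢; omega
        · simp only [hv, Bool.false_eq_true, if_false]
          have := ih (n - (n - 1) / 2 - 1) (by omega) (low + (n - 1) / 2 + 1)
          constructor
          · have := this.1; push_cast at this ⊢; omega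
          · have := this.2; push_cast at this ⊢; omega

-- A's loop on segment [low, low+n) with fallback t computes B's boundary (or t if it ran past the segment).
theorem ftpLoopA_eq_boundaryB (arr : List Int) :
    ∀ n low t, low + n ≤ arr.length →
      ftpLoopA arr (low : Int) ((low : Int) + (n : Int) - 1) t =
        (if ftpBoundaryB arr low n = ((low + n : Nat) : Int) then t else ftpBoundaryB arr low n) := by
  intro n
  induction n using Nat.strong_induction_on with
  | _ n ih =>
    intro low t hlen
    by_cases h : n = 0
    · subst h
      rw [ftpLoopA, ftpBoundaryB]
      simp
    · have hk : (n - 1) / 2 < n := by omega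
      have hmid : PySem.Int.floordiv ((low : Int) + ((low : Int) + (n : Int) - 1)) 2
          = ((low + (n - 1) / 2 : Nat) : Int) := by
        have : (low : Int) + ((low : Int) + (n : Int) - 1) = ((2 * low + (n - 1) : Nat) : Int) := by
          push_cast; omega
        rw [this, show (2:Int) = ((2:Nat):Int) from rfl, PySem.Int.floordiv_natCast]
        norm_cast
        omega
      rw [ftpLoopA]
      rw [dif_pos (by omega : (low : Int) ≤ (low : Int) + (n : Int) - 1)]
      simp only [hmid]
      rw [ftpBoundaryB]
      simp only [if_neg h]
      cases hg : PySem.List.pyGet? arr ((low + (n - 1) / 2 : Nat) : Int) with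
      | none =>
        -- unreachable in fact, but both sides agree syntactically anyway
        exfalso
        rw [PySem.List.pyGet?_natCast] at hg
        have : low + (n - 1) / 2 < arr.length := by omega
        simp [List.getElem?_eq_getElem this] at hg
      | some v =>
        by_cases hv : v == 1
        · simp only [hv, if_true]
          have harg : ((low + (n - 1) / 2 : Nat) : Int) - 1 = (low : Int) + ((n - 1) / 2 : Nat) - 1 := by
            push_cast; ring
          rw [harg]
          rw [ih ((n - 1) / 2) hk low ((low + (n - 1) / 2 : Nat) : Int) (by omega)]
          have hb := ftpBoundaryB_bounds arr ((n - 1) / 2) low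
          by_cases hr : ftpBoundaryB arr low ((n - 1) / 2) = ((low + (n - 1) / 2 : Nat) : Int)
          · rw [if_pos hr, if_neg (by push_cast at hr ⊢; omega), hr]
          · rw [if_neg hr, if_neg (by push_cast at hb hr ⊢; omega)]
        · simp only [hv, Bool.false_eq_true, if_false]
          have harg : ((low + (n - 1) / 2 : Nat) : Int) + 1 = ((low + (n - 1) / 2 + 1 : Nat) : Int) := by
            push_cast; ring
          have harg2 : (low : Int) + (n : Int) - 1
              = ((low + (n - 1) / 2 + 1 : Nat) : Int) + ((n - (n - 1) / 2 - 1 : Nat) : Int) - 1 := by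
            push_cast; omega
          rw [harg, harg2]
          rw [ih (n - (n - 1) / 2 - 1) (by omega) (low + (n - 1) / 2 + 1) t (by omega)]
          have hsum : ((low + (n - 1) / 2 + 1 + (n - (n - 1) / 2 - 1) : Nat) : Int)
              = ((low + n : Nat) : Int) := by push_cast; omega
          rw [hsum]

-- ===== VERDICT (by name: the statement is the Claim_ definition above) =====
theorem Find_Transition_Point_v2_spec : Claim_equal_Find_Transition_Point_v2 := by
  intro arr _
  unfold Spec_Find_Transition_Point_v2 Find_Transition_Point_v2 Find_Transition_Point_v2_alt
  have h := ftpLoopA_eq_boundaryB arr arr.length 0 (-1) (by omega)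
  simp only [Nat.cast_zero, zero_add] at h
  rw [h]
  show _ = if ftpBoundaryB arr 0 arr.length < (arr.length : Int) then ftpBoundaryB arr 0 arr.length else -1
  have hb := ftpBoundaryB_bounds arr arr.length 0
  rw [Nat.zero_add] at hb
  by_cases hp : ftpBoundaryB arr 0 arr.length = ((arr.length : Nat) : Int)
  · rw [if_pos hp, if_neg (by omega)]
  · rw [if_neg hp, if_pos (by omega)]
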